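-- pv_equiv track=rewrite | github.com/PSBERTAuthor/PSBERT | Model/PSBERT/gen_pretrain_data.py | convert_timestamp_to_position
-- ===== SOURCE A (Python) =====
-- def convert_timestamp_to_position(block_timestamps):
--     position = [0]
--     if len(block_timestamps) <= 1:
--         return position
--     last_ts = block_timestamps[1]
--     idx = 1
--     for b_ts in block_timestamps[1:]:
--         if b_ts != last_ts:
--             last_ts = b_ts
--             idx += 1
--         position.append(idx)
--     return position
-- ===== SOURCE B (Python) =====
-- def _runs(xs):
--     # lengths of the maximal runs of equal adjacent values in xs
--     runs = []
--     i, n = 0, len(xs)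
--     while i < n:
--         j = i + 1
--         while j < n and xs[j] == xs[i]:
--             j += 1
--         runs.append(j - i)
--         i = j
--     return runs
--
-- def convert_timestamp_to_position(block_timestamps):
--     if len(block_timestamps) <= 1:
--         return [0]
--     result = [0]
--     for i, rlen in enumerate(_runs(block_timestamps[1:]), start=1):
--         result += [i] * rlen
--     return result
-- ===== Notes on version B (the rewrite author's own statement) =====
-- stated objective: alternative
-- what changed: Replaces A's element-wise stateful last_ts/idx scan with a run-length decomposition: the tail is first split into maximal runs of equal values, then each run index is emitted repeated by the run's length.
import Mathlib
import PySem

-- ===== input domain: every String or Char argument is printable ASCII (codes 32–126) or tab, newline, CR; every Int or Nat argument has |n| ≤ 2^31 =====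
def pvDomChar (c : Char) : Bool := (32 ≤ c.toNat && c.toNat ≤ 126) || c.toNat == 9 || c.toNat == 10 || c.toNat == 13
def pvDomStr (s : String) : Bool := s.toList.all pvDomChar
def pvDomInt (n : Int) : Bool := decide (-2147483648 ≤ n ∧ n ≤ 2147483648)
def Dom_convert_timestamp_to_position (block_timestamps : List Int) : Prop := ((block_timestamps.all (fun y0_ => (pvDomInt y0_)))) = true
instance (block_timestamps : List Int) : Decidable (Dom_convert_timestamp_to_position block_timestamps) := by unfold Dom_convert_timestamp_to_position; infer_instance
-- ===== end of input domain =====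

-- B replaces A's element-wise stateful last_ts/idx scan with a run-length decomposition
-- (split the tail into maximal equal runs, then emit each run index repeated): alternative shape, same cost.

-- ===== PORT A =====
-- the for-loop of A: position entries appended one by one with state (last_ts, idx)
def pvLoopA (last idx : Int) : List Int → List Int
  | [] => []
  | b :: rest =>
      if b ≠ last then (idx + 1) :: pvLoopA b (idx + 1) rest
      else idx :: pvLoopA last idx rest

def convert_timestamp_to_position (block_timestamps : List Int) : List Int :=
  match block_timestamps with
  | [] => [0]
  | [_] => [0]
  | _ :: t :: rest => 0 :: pvLoopA t 1 (t :: rest)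

-- ===== PORT B =====
-- _runs: lengths of the maximal runs of equal adjacent values (inner while = takeWhile count, xs = xs[j:] = dropWhile)
def pvRuns : List Int → List Nat
  | [] => []
  | x :: xs =>
      ((xs.takeWhile (fun y => y == x)).length + 1) :: pvRuns (xs.dropWhile (fun y => y == x))
termination_by xs => xs.length
decreasing_by
  simp only [List.length_cons]
  exact Nat.lt_succ_of_le (List.length_dropWhile_le _ _)

-- result += [i] * rlen over enumerate(runs, start=1)
def pvEmit (i : Int) : List Nat → List Int
  | [] => []
  | r :: rs => List.replicate r i ++ pvEmit (i + 1) rs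

def convert_timestamp_to_position_alt (block_timestamps : List Int) : List Int :=
  if block_timestamps.length ≤ 1 then [0]
  else 0 :: pvEmit 1 (pvRuns (block_timestamps.drop 1))

-- ===== PRECONDITION & SPEC =====
def Spec_convert_timestamp_to_position (block_timestamps : List Int) (out : List Int) : Prop := out = convert_timestamp_to_position_alt block_timestamps
instance (block_timestamps : List Int) (out : List Int) : Decidable (Spec_convert_timestamp_to_position block_timestamps out) := by unfold Spec_convert_timestamp_to_position; infer_instance

-- ===== CLAIM (what is proved, stated in full; the proofs are below) =====
def Claim_equal_convert_timestamp_to_position : Prop := ∀ (block_timestamps : List Int), Dom_convert_timestamp_to_position block_timestamps → Spec_convert_timestamp_to_position block_timestamps (convert_timestamp_to_position block_timestamps)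

-- ===== LEMMAS AND PROOFS =====
theorem pvLoopA_eq_runs (xs : List Int) : ∀ (h idx : Int),
    pvLoopA h idx xs
      = List.replicate (xs.takeWhile (fun y => y == h)).length idx
        ++ pvEmit (idx + 1) (pvRuns (xs.dropWhile (fun y => y == h))) := by
  induction xs with
  | nil => intro h idx; simp [pvLoopA, pvRuns, pvEmit]
  | cons b r ih =>
      intro h idx
      by_cases hb : b = h
      · subst hb
        simp only [pvLoopA, List.takeWhile_cons, List.dropWhile_cons, beq_self_eq_true,
          if_true, if_neg (by simp : ¬ (b ≠ b)), List.length_cons]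
        rw [List.replicate_succ]
        simp [ih b idx]
      · simp only [pvLoopA, if_pos hb, List.takeWhile_cons, List.dropWhile_cons,
          beq_iff_eq, hb, if_false, List.length_nil, List.replicate_zero, List.nil_append,
          pvRuns, pvEmit]
        rw [List.replicate_succ]
        simp [ih b (idx + 1)]

theorem convert_timestamp_to_position_spec : Claim_equal_convert_timestamp_to_position := by
  intro bts _
  unfold Spec_convert_timestamp_to_position
  match bts with
  | [] => rfl
  | [x] => rfl
  | x :: t :: rest =>
      simp only [convert_timestamp_to_position, convert_timestamp_to_position_alt]
      have hlen : ¬ (x :: t :: rest).length ≤ 1 := by simp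
      simp only [hlen, if_false, List.drop_succ_cons, List.drop_zero]
      have : pvLoopA t 1 (t :: rest) = pvEmit 1 (pvRuns (t :: rest)) := by
        simp only [pvRuns, pvEmit]
        rw [List.replicate_succ]
        simpa using pvLoopA_eq_runs (t :: rest) t 1
      rw [this]
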